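-- pv_equiv track=rewrite | github.com/code-happy-ws/py_learn | learn/algorithm/自定义排序/比自己大的数量.py | more
-- ===== SOURCE A (Python) =====
-- def more(nums):
--     end = len(nums) - 1
--     more_nums = [None] * len(nums)
--     fast = 0
--     for pos, num in enumerate(nums):
--         if pos == fast:
--             fast = pos + 1
--             now_more_num = end - pos
--             while fast <= end and nums[fast] == nums[pos]:
--                 now_more_num -= 1
--                 fast += 1
--             if fast - pos > 1:
--                 more_nums[pos:fast] = [now_more_num] * (fast - pos)
--                 more_nums[:pos] = [n - 1 for n in more_nums[:pos]]
--             else: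
--                 more_nums[pos] = now_more_num
--     return more_nums
-- ===== SOURCE B (Python) =====
-- def more(nums):
--     # One O(n) pass over the maximal runs of equal adjacent values,
--     # then one reverse pass accumulating (elements after, big runs after),
--     # writing the output back-to-front and reversing once at the end.
--     runs = []
--     i, n = 0, len(nums)
--     while i < n:
--         j = i + 1
--         while j < n and nums[j] == nums[i]:
--             j += 1
--         runs.append(j - i)
--         i = j
--     rev = []
--     elems_after = 0
--     big_after = 0
--     for k in reversed(runs):
--         rev.extend([elems_after - big_after] * k)
--         elems_after += k
--         if k >= 2:
--             big_after += 1
--     rev.reverse()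
--     return rev
-- ===== Notes on version B (the rewrite author's own statement) =====
-- stated objective: faster
-- what changed: A repeatedly re-slices and rewrites the whole prefix of the result at every duplicate run (quadratic in the worst case); B computes the run lengths in one pass and then fills the output in a single reverse accumulation pass, so no prefix is ever rewritten.
import Mathlib
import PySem

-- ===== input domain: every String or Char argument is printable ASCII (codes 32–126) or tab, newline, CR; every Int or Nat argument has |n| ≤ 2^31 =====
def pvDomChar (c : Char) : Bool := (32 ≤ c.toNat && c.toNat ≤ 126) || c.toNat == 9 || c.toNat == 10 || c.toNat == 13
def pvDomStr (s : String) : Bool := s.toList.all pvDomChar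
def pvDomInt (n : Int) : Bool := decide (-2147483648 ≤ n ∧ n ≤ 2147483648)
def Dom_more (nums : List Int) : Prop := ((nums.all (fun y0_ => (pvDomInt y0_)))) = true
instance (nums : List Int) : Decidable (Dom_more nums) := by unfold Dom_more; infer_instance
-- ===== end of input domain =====

-- B replaces A's quadratic re-slicing of the prefix with one run-length pass and one
-- reverse accumulation pass (objective: faster on duplicate-heavy inputs).

-- ===== PORT A =====
-- the inner 'while fast <= end and nums[fast] == nums[pos]' loop;
-- nums[fast]/nums[pos] are always in range in A, so pyGetD is exact here
def moreWhile (nums : List Int) (pos : Int) (fast now : Int) : Int × Int :=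
  if h : fast ≤ (nums.length : Int) - 1 ∧ PySem.List.pyGetD nums fast 0 = PySem.List.pyGetD nums pos 0 then
    moreWhile nums pos (fast + 1) (now - 1)
  else (fast, now)
termination_by (((nums.length : Int) - fast)).toNat
decreasing_by omega

-- one iteration of 'for pos, num in enumerate(nums)'; state = (fast, more_nums).
-- more_nums is initialised with 0 in place of Python's None: every cell A ever
-- reads ('more_nums[:pos]') has already been written, so the placeholder is exact.
def moreStep (nums : List Int) (st : Int × List Int) (pn : Int × Int) : Int × List Int :=
  if pn.1 = st.1 then
    let r := moreWhile nums pn.1 (pn.1 + 1) (((nums.length : Int) - 1) - pn.1)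
    if r.1 - pn.1 > 1 then
      (r.1, ((st.2.take pn.1.toNat).map (fun x => x - 1)) ++
            List.replicate (r.1 - pn.1).toNat r.2 ++ st.2.drop r.1.toNat)
    else
      (r.1, st.2.set pn.1.toNat r.2)
  else st

def more (nums : List Int) : List Int :=
  ((PySem.List.enumerate nums 0).foldl (moreStep nums) (0, List.replicate nums.length 0)).2

-- ===== PORT B =====
-- length of the run of x at the front of the list, plus the remainder
def splitRun (x : Int) : List Int → Nat × List Int
  | [] => (0, [])
  | y :: ys => if y = x then ((splitRun x ys).1 + 1, (splitRun x ys).2) else (0, y :: ys)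

lemma splitRun_len (x : Int) : ∀ l : List Int, (splitRun x l).2.length ≤ l.length := by
  intro l; induction l with
  | nil => simp [splitRun]
  | cons y ys ih => by_cases h : y = x <;> simp [splitRun, h]; omega

-- the run lengths of nums, left to right ('runs' in Source B)
def runLens : List Int → List Nat
  | [] => []
  | x :: xs => ((splitRun x xs).1 + 1) :: runLens (splitRun x xs).2
termination_by l => l.length
decreasing_by exact Nat.lt_succ_of_le (splitRun_len x xs)

-- one iteration of Source B's 'for k in reversed(runs)'; state = (rev, elems_after, big_after)
def revStep (st : List Int × Int × Int) (k : Nat) : List Int × Int × Int :=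
  (st.1 ++ List.replicate k (st.2.1 - st.2.2), st.2.1 + (k : Int),
   if 2 ≤ k then st.2.2 + 1 else st.2.2)

def more_alt (nums : List Int) : List Int :=
  ((runLens nums).reverse.foldl revStep ([], 0, 0)).1.reverse

-- ===== PRECONDITION & SPEC =====
def Spec_more (nums : List Int) (out : List Int) : Prop := out = more_alt nums
instance (nums : List Int) (out : List Int) : Decidable (Spec_more nums out) := by unfold Spec_more; infer_instance

-- ===== CLAIM (what is proved, stated in full; the proofs are below) =====
def Claim_equal_more : Prop := ∀ (nums : List Int), Dom_more nums → Spec_more nums (more nums)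

-- ===== LEMMAS AND PROOFS =====

-- proof-side characterisation of Source B's reverse pass, processed head-first
def buildOut : List Nat → List Int × Int × Int
  | [] => ([], 0, 0)
  | k :: rest =>
    let r := buildOut rest
    (List.replicate k (r.2.1 - r.2.2) ++ r.1, r.2.1 + (k : Int),
     if 2 ≤ k then r.2.2 + 1 else r.2.2)

lemma revFold_eq (rs : List Nat) :
    rs.reverse.foldl revStep ([], 0, 0)
      = ((buildOut rs).1.reverse, (buildOut rs).2.1, (buildOut rs).2.2) := by
  induction rs with
  | nil => simp [buildOut]
  | cons k rest ih =>
    simp only [List.reverse_cons, List.foldl_append, List.foldl_cons, List.foldl_nil, ih]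
    simp [revStep, buildOut, List.reverse_append]

lemma splitRun_drop (x : Int) : ∀ l : List Int,
    (splitRun x l).2 = l.drop (splitRun x l).1 ∧ (splitRun x l).1 ≤ l.length := by
  intro l; induction l with
  | nil => simp [splitRun]
  | cons y ys ih =>
    by_cases h : y = x <;> simp [splitRun, h]
    exact ⟨ih.1, by omega⟩

lemma buildOut_elems : ∀ (N : Nat) (l : List Int), l.length ≤ N →
    (buildOut (runLens l)).2.1 = (l.length : Int) := by
  intro N
  induction N with
  | zero => intro l hl; have : l = [] := List.eq_nil_of_length_eq_zero (Nat.le_zero.mp hl)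
            subst this; simp [runLens, buildOut]
  | succ n ih =>
    intro l hl
    match l with
    | [] => simp [runLens, buildOut]
    | x :: xs =>
      have h1 := (splitRun_drop x xs).1
      have h2 := (splitRun_drop x xs).2
      have hlen : (splitRun x xs).2.length = xs.length - (splitRun x xs).1 := by
        rw [h1]; simp
      have := ih (splitRun x xs).2 (by simp at hl; omega)
      rw [runLens]
      simp only [buildOut, this]
      simp [hlen]; omega

lemma drop_cons_succ (nums : List Int) (n : Nat) (y : Int) (ys : List Int)
    (h : nums.drop n = y :: ys) : nums.drop (n + 1) = ys := by
  rw [← List.drop_drop, h]; rfl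

lemma getElem_of_drop_cons (nums : List Int) (n : Nat) (y : Int) (ys : List Int)
    (h : nums.drop n = y :: ys) (hn : n < nums.length) : nums[n] = y := by
  have h0 : (nums.drop n)[0]'(by rw [h]; simp) = y := by simp [h]
  simpa using h0

lemma moreWhile_eq (nums : List Int) (pos : Int) :
    ∀ (t : List Int) (f now : Int), 0 ≤ f → nums.drop f.toNat = t →
    moreWhile nums pos f now =
      (f + ((splitRun (PySem.List.pyGetD nums pos 0) t).1 : Int),
       now - ((splitRun (PySem.List.pyGetD nums pos 0) t).1 : Int)) := by
  intro t
  induction t with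
  | nil =>
    intro f now hf hd
    have hlen : nums.length ≤ f.toNat := by
      have := congrArg List.length hd; simp at this; omega
    rw [moreWhile, dif_neg (by intro h; omega)]
    simp [splitRun]
  | cons y ys ih =>
    intro f now hf hd
    have hflt : f.toNat < nums.length := by
      have := congrArg List.length hd; simp at this; omega
    have hget : PySem.List.pyGetD nums f 0 = y := by
      rw [PySem.List.pyGetD_eq_getElem nums 0 hf (by omega)]
      exact getElem_of_drop_cons nums f.toNat y ys hd hflt
    by_cases hyx : y = PySem.List.pyGetD nums pos 0
    · rw [moreWhile, dif_pos ⟨by omega, by rw [hget, hyx]⟩]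
      rw [ih (f + 1) (now - 1) (by omega)
        (by rw [show (f + 1).toNat = f.toNat + 1 by omega]
            exact drop_cons_succ nums f.toNat y ys hd)]
      simp [splitRun, hyx]
      constructor <;> push_cast <;> try ring
    · rw [moreWhile, dif_neg (by intro h; exact hyx (hget ▸ h.2))]
      simp [splitRun, hyx]

lemma fold_noop (nums : List Int) :
    ∀ (l : List Int) (i : Int) (f : Int) (mn : List Int),
    i + (l.length : Int) ≤ f →
    (PySem.List.enumerate l i).foldl (moreStep nums) (f, mn) = (f, mn) := by
  intro l
  induction l with
  | nil => intro i f mn _; simp [PySem.List.enumerate_nil]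
  | cons y ys ih =>
    intro i f mn h
    rw [PySem.List.enumerate_cons]
    simp only [List.foldl_cons]
    have hne : i ≠ f := by simp at h; omega
    rw [moreStep, if_neg hne]
    exact ih (i + 1) f mn (by simp at h ⊢; omega)

lemma chunk (nums : List Int) :
    ∀ (N : Nat) (t : List Int) (p : Nat) (pre : List Int), t.length ≤ N →
    nums.drop p = t → pre.length = p → p + t.length = nums.length →
    (PySem.List.enumerate t (p : Int)).foldl (moreStep nums)
        ((p : Int), pre ++ List.replicate t.length 0)
      = ((nums.length : Int),
         pre.map (fun v => v - (buildOut (runLens t)).2.2) ++ (buildOut (runLens t)).1) := by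
  intro N
  induction N with
  | zero =>
    intro t p pre hN hd hp hlen
    have ht : t = [] := List.eq_nil_of_length_eq_zero (Nat.le_zero.mp hN)
    subst ht
    simp only [PySem.List.enumerate_nil, List.foldl_nil, runLens, buildOut,
      List.length_nil, List.replicate_zero, List.append_nil]
    have : p = nums.length := by omega
    subst this
    simp
  | succ n ih =>
    intro t p pre hN hd hp hlen
    match t with
    | [] =>
      simp only [PySem.List.enumerate_nil, List.foldl_nil, runLens, buildOut,
        List.length_nil, List.replicate_zero, List.append_nil]
      have : p = nums.length := by simp at hlen; omega
      subst this
      simp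
    | x :: ts =>
      have hplt : p < nums.length := by simp at hlen; omega
      have hdrop1 : nums.drop (p + 1) = ts := drop_cons_succ nums p x ts hd
      have hgx : PySem.List.pyGetD nums (p : Int) 0 = x := by
        rw [PySem.List.pyGetD_eq_getElem nums 0 (by omega) (by push_cast; omega)]
        simp only [Int.toNat_natCast]
        exact getElem_of_drop_cons nums p x ts hd hplt
      have hW := moreWhile_eq nums (p : Int) ts ((p : Int) + 1)
        (((nums.length : Int) - 1) - (p : Int)) (by omega)
        (by rw [show ((p : Int) + 1).toNat = p + 1 by omega]; exact hdrop1)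
      rw [hgx] at hW
      set k' := (splitRun x ts).1 with hk'
      set rest := (splitRun x ts).2 with hrest
      clear_value k' rest
      have hrd : rest = ts.drop k' := by rw [hrest, hk']; exact (splitRun_drop x ts).1
      have hkle : k' ≤ ts.length := by rw [hk']; exact (splitRun_drop x ts).2
      have hrl : rest.length = ts.length - k' := by rw [hrd]; simp
      have hrdrop : nums.drop (p + 1 + k') = rest := by
        rw [← List.drop_drop, hdrop1, hrd]
      -- first fold step
      rw [PySem.List.enumerate_cons, List.foldl_cons]
      rw [moreStep]
      simp only [hW, if_true]
      by_cases hk1 : k' = 0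
      · -- run of length 1
        subst hk1
        simp only [Nat.cast_zero, add_zero, sub_zero]
        rw [if_neg (by omega)]
        have hset : (pre ++ List.replicate (x :: ts).length 0).set ((p : Int)).toNat
              (((nums.length : Int) - 1) - (p : Int))
            = (pre ++ [((nums.length : Int) - 1) - (p : Int)]) ++ List.replicate ts.length 0 := by
          simp only [Int.toNat_natCast, List.length_cons, List.replicate_succ]
          rw [← hp, List.set_append_right _ _ (le_refl pre.length)]
          simp
        rw [hset]
        have hts : rest = ts := by rw [hrd]; simp
        have hIH := ih ts (p + 1) (pre ++ [((nums.length : Int) - 1) - (p : Int)])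
          (by simp at hN; omega) hdrop1 (by simp [hp]) (by simp at hlen ⊢; omega)
        rw [show ((p : Nat) + 1 : Nat) = p + 1 from rfl] at hIH
        push_cast at hIH
        rw [show ((p : Int) + 1) = ((p + 1 : Nat) : Int) by push_cast; ring]
        push_cast
        rw [hIH]
        have he' := buildOut_elems ts.length ts le_rfl
        rw [runLens, ← hk', ← hrest, hts]
        simp only [buildOut, zero_add]
        rw [if_neg (by omega)]
        simp only [List.map_append, List.map_cons, List.map_nil, List.replicate_one]
        rw [he']
        have : ((nums.length : Int) - 1) - (p : Int) = (ts.length : Int) := by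
          simp at hlen; push_cast; omega
        rw [this]
        simp
      · -- run of length k'+1 ≥ 2
        rw [if_pos (by push_cast; omega)]
        have htake : (pre ++ List.replicate (x :: ts).length 0).take ((p : Int)).toNat = pre := by
          simp [← hp]
        have hdropm : (pre ++ List.replicate (x :: ts).length 0).drop
              ((p : Int) + 1 + (k' : Int)).toNat = List.replicate (ts.length - k') 0 := by
          rw [show ((p : Int) + 1 + (k' : Int)).toNat = pre.length + (1 + k') by omega]
          rw [List.drop_append]
          rw [List.drop_eq_nil_of_le (by omega), List.nil_append, List.drop_replicate]
          congr 1
          simp only [List.length_cons]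
          omega
        have hrepl : ((p : Int) + 1 + (k' : Int) - (p : Int)).toNat = k' + 1 := by omega
        rw [htake, hdropm, hrepl]
        set v : Int := ((nums.length : Int) - 1) - (p : Int) - (k' : Int) with hv
        -- split the remaining enumerate at the end of the run
        have hsplit : ts = ts.take k' ++ rest := by rw [hrd]; simp
        rw [show PySem.List.enumerate ts ((p : Int) + 1)
              = PySem.List.enumerate (ts.take k') ((p : Int) + 1)
                ++ PySem.List.enumerate rest (((p : Int) + 1) + (ts.take k').length) by
            conv_lhs => rw [hsplit]
            exact PySem.List.enumerate_append _ _ _]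
        rw [List.foldl_append]
        rw [fold_noop nums (ts.take k') ((p : Int) + 1) _ _
          (by push_cast [List.length_take]; omega)]
        have hIH := ih rest (p + 1 + k')
          (pre.map (fun u => u - 1) ++ List.replicate (k' + 1) v)
          (by simp at hN; omega) hrdrop
          (by simp [hp]; omega) (by simp at hlen ⊢; omega)
        rw [show (((p + 1 + k' : Nat)) : Int) = (p : Int) + 1 + (k' : Int) by push_cast; ring] at hIH
        rw [show (((p : Int) + 1) + (ts.take k').length : Int) = (p : Int) + 1 + (k' : Int) by
          simp [Nat.min_eq_left hkle]]
        rw [hrl] at hIH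
        rw [hIH]
        -- assemble
        rw [runLens, ← hk', ← hrest]
        simp only [buildOut]
        rw [if_pos (by omega)]
        have he' := buildOut_elems rest.length rest le_rfl
        simp only [List.map_append, List.map_map, List.map_replicate]
        rw [he']
        have hva : v - (buildOut (runLens rest)).2.2
            = (rest.length : Int) - (buildOut (runLens rest)).2.2 := by
          rw [hv, hrl]; simp at hlen; push_cast; omega
        rw [hva]
        have hmap : pre.map ((fun u : Int => u - (buildOut (runLens rest)).2.2) ∘ (fun u => u - 1))
            = pre.map (fun u => u - ((buildOut (runLens rest)).2.2 + 1)) := by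
          apply List.map_congr_left; intro a _; simp [Function.comp]; ring
        rw [hmap]
        simp

-- ===== VERDICT (by name: the statement is the Claim_ definition above) =====
theorem more_spec : Claim_equal_more := by
  intro nums _
  unfold Spec_more more more_alt
  rw [revFold_eq]
  have h := chunk nums nums.length nums 0 [] le_rfl (by simp) rfl (by simp)
  simp only [Nat.cast_zero, List.nil_append, List.map_nil] at h
  rw [h]
  simp
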